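-- pv_equiv track=rewrite | github.com/Lynchie/KCM | stave.py | findStaves
-- ===== SOURCE A (Python) =====
-- def findStaves(image):
--     foundOnes = []
--     staves = []
--     for column in range(len(image[0])):
--         for row in range(len(image)):
--             if image[row][column] == 1:
--                 foundOnes.append(row)
--     for i in range(len(image)):
--         if foundOnes.count(i) == len(image[0]):
--             staves.append(True)
--         else:
--             staves.append(False)
--     return staves
-- ===== SOURCE B (Python) =====
-- def findStaves(image):
--     ncols = len(image[0])
--     return [all(image[i][c] == 1 for c in range(ncols)) for i in range(len(image))]
-- ===== Notes on version B (the rewrite author's own statement) =====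
-- stated objective: alternative
-- what changed: Replaces A's column-major build of a foundOnes row-index tally plus a per-row foundOnes.count aggregation with a single direct row-major all-ones scan over the first len(image[0]) columns of each row.
import Mathlib
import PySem

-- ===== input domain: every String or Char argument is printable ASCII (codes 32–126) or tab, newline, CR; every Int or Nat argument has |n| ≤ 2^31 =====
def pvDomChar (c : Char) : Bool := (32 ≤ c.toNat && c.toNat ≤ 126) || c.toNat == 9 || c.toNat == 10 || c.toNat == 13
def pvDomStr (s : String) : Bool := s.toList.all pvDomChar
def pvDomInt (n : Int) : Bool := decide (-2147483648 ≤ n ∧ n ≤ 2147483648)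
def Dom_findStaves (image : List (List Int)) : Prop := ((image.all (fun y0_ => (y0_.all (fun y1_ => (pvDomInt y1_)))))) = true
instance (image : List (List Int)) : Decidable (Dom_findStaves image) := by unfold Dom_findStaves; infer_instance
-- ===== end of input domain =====

-- B replaces A's column-major foundOnes tally + per-row .count aggregation with a
-- direct row-major all-ones test over the first len(image[0]) columns of each row.

-- ===== PORT A =====
def findStaves (image : List (List Int)) : List Bool :=
  let ncols : Int := (PySem.List.pyGetD image 0 []).length
  let foundOnes : List Int :=
    (PySem.List.pyRange 0 ncols 1).foldl (fun fo column =>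
      (PySem.List.pyRange 0 (image.length : Int) 1).foldl (fun fo2 row =>
        if PySem.List.pyGetD (PySem.List.pyGetD image row []) column 0 = 1 then fo2 ++ [row]
        else fo2) fo) []
  (PySem.List.pyRange 0 (image.length : Int) 1).foldl (fun staves i =>
    if (PySem.List.count foundOnes i : Int) = ncols then staves ++ [true]
    else staves ++ [false]) []

-- ===== PORT B =====
def findStaves_alt (image : List (List Int)) : List Bool :=
  let ncols : Int := (PySem.List.pyGetD image 0 []).length
  (PySem.List.pyRange 0 (image.length : Int) 1).map (fun i =>
    (PySem.List.pyRange 0 ncols 1).all (fun c =>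
      PySem.List.pyGetD (PySem.List.pyGetD image i []) c 0 == 1))

-- ===== PRECONDITION & SPEC =====
-- Pre_ excludes exactly the inputs where Python A raises IndexError: the empty image
-- (image[0]) and ragged images with a row shorter than len(image[0]).
def Pre_findStaves (image : List (List Int)) : Prop :=
  image ≠ [] ∧ ∀ r ∈ image, (image.headD []).length ≤ r.length
instance (image : List (List Int)) : Decidable (Pre_findStaves image) := by
  unfold Pre_findStaves; infer_instance

def pvWitness_findStaves : List (List Int) := [[1, 1], [1, 0]]

def Spec_findStaves (image : List (List Int)) (out : List Bool) : Prop := out = findStaves_alt image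
instance (image : List (List Int)) (out : List Bool) : Decidable (Spec_findStaves image out) := by unfold Spec_findStaves; infer_instance

-- ===== CLAIM (what is proved, stated in full; the proofs are below) =====
def Claim_equal_findStaves : Prop := ∀ (image : List (List Int)), Dom_findStaves image → Pre_findStaves image → Spec_findStaves image (findStaves image)

-- ===== LEMMAS AND PROOFS =====

-- count distributes over flatMap
theorem count_flatMap_sum (i : Int) (cols : List Int) (g : Int → List Int) :
    List.count i (cols.flatMap g) = (cols.map (fun c => List.count i (g c))).sum := by
  induction cols with
  | nil => simp
  | cons c cs ih => simp [List.flatMap_cons, List.count_append, ih]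

theorem sum_map_ite_one_zero_nat (p : Int → Bool) (l : List Int) :
    (l.map (fun c => if p c then 1 else 0)).sum = l.countP p := by
  induction l with
  | nil => simp
  | cons x xs ih => by_cases h : p x <;> simp [h, ih, Nat.add_comm]

theorem findStaves_spec' (image : List (List Int)) :
    findStaves image = findStaves_alt image := by
  unfold findStaves findStaves_alt
  dsimp only
  set ncols : Int := ((PySem.List.pyGetD image 0 []).length : Int) with hnc
  set get : Int → Int → Int :=
    fun r c => PySem.List.pyGetD (PySem.List.pyGetD image r []) c 0 with hget
  have hnc0 : 0 ≤ ncols := by positivity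
  -- the foundOnes list, in closed form
  have hfo :
      (PySem.List.pyRange 0 ncols 1).foldl (fun fo column =>
        (PySem.List.pyRange 0 (image.length : Int) 1).foldl (fun fo2 row =>
          if get row column = 1 then fo2 ++ [row] else fo2) fo) []
      = (PySem.List.pyRange 0 ncols 1).flatMap (fun c =>
          (PySem.List.pyRange 0 (image.length : Int) 1).filter (fun r => decide (get r c = 1))) := by
    rw [PySem.List.foldl_congr_mem
      (g := fun fo column => fo ++
        (PySem.List.pyRange 0 (image.length : Int) 1).filter (fun r => decide (get r column = 1)))]
    · exact PySem.List.foldl_append_eq_flatMap _ _ _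
    · intro acc c _
      exact PySem.List.foldl_append_ite_eq_filter (fun r => get r c = 1) _ _
  rw [hfo]
  set fo := (PySem.List.pyRange 0 ncols 1).flatMap (fun c =>
      (PySem.List.pyRange 0 (image.length : Int) 1).filter (fun r => decide (get r c = 1))) with hfodef
  -- turn the output loop into a map
  rw [PySem.List.foldl_congr_mem
    (g := fun staves i => staves ++
      [decide ((PySem.List.count fo i : Int) = ncols)])]
  · rw [PySem.List.foldl_append_singleton_eq_map, List.nil_append]
    apply List.map_congr_left
    intro i hi
    rw [PySem.List.mem_pyRange_one] at hi
    -- count of i in fo = number of columns c with get i c = 1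
    have hcnt : List.count i fo =
        (PySem.List.pyRange 0 ncols 1).countP (fun c => decide (get i c = 1)) := by
      rw [hfodef, count_flatMap_sum]
      rw [← sum_map_ite_one_zero_nat]
      congr 1
      apply List.map_congr_left
      intro c _
      by_cases h : get i c = 1
      · rw [if_pos (by simpa using h)]
        exact List.count_eq_one_of_mem
          ((PySem.List.nodup_pyRange_one 0 _ ).filter _)
          (List.mem_filter.mpr ⟨PySem.List.mem_pyRange_one.mpr hi, by simpa using h⟩)
      · rw [if_neg (by simpa using h)]
        exact List.count_eq_zero.mpr (fun hm => h (by simpa using (List.mem_filter.mp hm).2))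
    rw [PySem.List.count_eq, hcnt]
    have hlen : (PySem.List.pyRange 0 ncols 1).length = ncols.toNat := by
      simp [PySem.List.length_pyRange_one]
    by_cases hall : ∀ c ∈ PySem.List.pyRange 0 ncols 1, get i c = 1
    · have hcp : (PySem.List.pyRange 0 ncols 1).countP (fun c => decide (get i c = 1))
          = (PySem.List.pyRange 0 ncols 1).length := by
        rw [List.countP_eq_length]
        intro c hc; simpa using hall c hc
      have h2 : ((PySem.List.pyRange 0 ncols 1).all
          (fun c => PySem.List.pyGetD (PySem.List.pyGetD image i []) c 0 == 1)) = true := by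
        rw [List.all_eq_true]; intro c hc; simpa using hall c hc
      rw [hcp, hlen, h2]
      simp [Int.toNat_of_nonneg hnc0]
    · push Not at hall
      obtain ⟨c, hcm, hcv⟩ := hall
      have hlt : (PySem.List.pyRange 0 ncols 1).countP (fun c => decide (get i c = 1))
          < (PySem.List.pyRange 0 ncols 1).length := by
        have hle := List.countP_le_length (p := fun c => decide (get i c = 1))
          (l := PySem.List.pyRange 0 ncols 1)
        have hne' : (PySem.List.pyRange 0 ncols 1).countP (fun c => decide (get i c = 1))
            ≠ (PySem.List.pyRange 0 ncols 1).length := by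
          intro he
          exact hcv (by simpa using List.countP_eq_length.mp he c hcm)
        omega
      have h2 : ((PySem.List.pyRange 0 ncols 1).all
          (fun c => PySem.List.pyGetD (PySem.List.pyGetD image i []) c 0 == 1)) = false := by
        rw [List.all_eq_false]
        exact ⟨c, hcm, by simpa using hcv⟩
      rw [hlen] at hlt
      have hne : (((PySem.List.pyRange 0 ncols 1).countP (fun c => decide (get i c = 1)) : Int)) ≠ ncols := by
        omega
      rw [h2]
      simpa using hne
  · intro acc i _
    by_cases h : (List.count i fo : Int) = ncols <;> simp [PySem.List.count_eq, h]

-- ===== VERDICT (by name: the statement is the Claim_ definition above) =====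
theorem findStaves_spec : Claim_equal_findStaves := by
  intro image _ _
  unfold Spec_findStaves
  exact findStaves_spec' image
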